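-- pv_equiv track=rewrite | github.com/hw725/classical-text-browser | src/core/alignment.py | _collect_probe_candidates
-- ===== SOURCE A (Python) =====
-- def _collect_probe_candidates(
--     ocr_text: str,
--     ref_text: str,
--     probe_len: int = 5,
-- ) -> list[int]:
--     """OCR 텍스트의 여러 위치에서 probe를 추출하여 ref에서 후보 위치를 수집한다.
--
--     왜 여러 위치에서 probe를 추출하나:
--       OCR 첫 글자부터 오류일 수 있다. 시작부·중간부·끝부에서 probe를 추출하여
--       하나라도 ref에서 발견되면 후보로 채택한다.
--
--     입력:
--         ocr_text — OCR 블록 텍스트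
--         ref_text — L4 참조 텍스트
--         probe_len — probe 길이
--     출력: 후보 위치 리스트 (중복 제거, 정렬됨)
--     """
--     if len(ocr_text) < probe_len:
--         return []
--
--     # 시작부·중간부·끝부에서 probe 추출
--     probes = []
--     probes.append(ocr_text[:probe_len])
--     if len(ocr_text) >= probe_len * 2:
--         mid = len(ocr_text) // 2
--         probes.append(ocr_text[mid:mid + probe_len])
--     if len(ocr_text) >= probe_len * 3:
--         probes.append(ocr_text[-(probe_len):])
--
--     candidates = set()
--     for probe in probes:
--         start = 0
--         while True:
--             pos = ref_text.find(probe, start)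
--             if pos < 0:
--                 break
--             candidates.add(pos)
--             start = pos + 1
--
--     return sorted(candidates)
-- ===== SOURCE B (Python) =====
-- def _collect_probe_candidates(
--     ocr_text: str,
--     ref_text: str,
--     probe_len: int = 5,
-- ) -> list[int]:
--     """Single scan over the start positions of ref_text, testing each fitting window
--     against a set of probes."""
--     if len(ocr_text) < probe_len:
--         return []
--
--     probes = []
--     probes.append(ocr_text[:probe_len])
--     if len(ocr_text) >= probe_len * 2:
--         mid = len(ocr_text) // 2
--         probes.append(ocr_text[mid:mid + probe_len])
--     if len(ocr_text) >= probe_len * 3: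
--         probes.append(ocr_text[-(probe_len):])
--
--     probe_set = set(probes)
--     n = len(ref_text)
--     candidates = set()
--     for i in range(n + 1):
--         if i + probe_len <= n and any(ref_text.startswith(probe, i) for probe in probe_set):
--             candidates.add(i)
--     return sorted(candidates)
-- ===== Notes on version B (the rewrite author's own statement) =====
-- stated objective: idiomatic
-- what changed: B keeps the probe-extraction block but replaces A's per-probe repeated str.find while-loops over ref_text by a single left-to-right scan of ref_text that tests each start position with startswith against a set of probes.
import Mathlib
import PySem

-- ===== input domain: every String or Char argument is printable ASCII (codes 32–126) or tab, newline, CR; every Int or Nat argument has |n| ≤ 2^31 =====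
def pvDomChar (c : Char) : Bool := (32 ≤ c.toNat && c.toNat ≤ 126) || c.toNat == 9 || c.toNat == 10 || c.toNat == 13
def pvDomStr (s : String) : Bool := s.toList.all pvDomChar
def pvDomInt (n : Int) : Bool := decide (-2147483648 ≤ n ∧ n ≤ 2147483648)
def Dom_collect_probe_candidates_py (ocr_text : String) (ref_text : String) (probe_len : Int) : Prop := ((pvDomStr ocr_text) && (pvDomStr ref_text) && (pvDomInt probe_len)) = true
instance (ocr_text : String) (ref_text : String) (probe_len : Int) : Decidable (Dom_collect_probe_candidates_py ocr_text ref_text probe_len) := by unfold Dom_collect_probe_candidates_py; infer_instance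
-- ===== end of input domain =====

-- B replaces A's per-probe repeated str.find scans by one scan of ref_text testing each
-- start position with startswith against a set of probes (objective: more idiomatic).

-- ===== PORT A =====
-- probe extraction block (textually identical in A and B; both ports share it)
def pvProbes (ocr_text : String) (probe_len : Int) : List String :=
  let probes := [PySem.Str.slice ocr_text none (some probe_len)]
  let probes :=
    if probe_len * 2 ≤ PySem.Str.len ocr_text then
      let mid := PySem.Int.floordiv (PySem.Str.len ocr_text) 2
      probes ++ [PySem.Str.slice ocr_text (some mid) (some (mid + probe_len))]
    else probes
  if probe_len * 3 ≤ PySem.Str.len ocr_text then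
    probes ++ [PySem.Str.slice ocr_text (some (-probe_len)) none]
  else probes

-- the 'while True: pos = ref_text.find(probe, start); …' loop of A (fuel bounds the iterations)
def pvFindLoop (ref_text probe : String) (start : Int) (cands : PySem.Set Int) (fuel : Nat) : PySem.Set Int :=
  match fuel with
  | 0 => cands
  | Nat.succ fuel =>
    let pos := PySem.Str.findFrom ref_text probe start
    if pos < 0 then cands
    else pvFindLoop ref_text probe (pos + 1) (PySem.Set.add cands pos) fuel

def collect_probe_candidates_py (ocr_text : String) (ref_text : String) (probe_len : Int) : List Int :=
  if PySem.Str.len ocr_text < probe_len then []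
  else
    let probes := pvProbes ocr_text probe_len
    let candidates := probes.foldl
      (fun cands probe => pvFindLoop ref_text probe 0 cands ((PySem.Str.len ref_text).toNat + 2))
      PySem.Set.empty
    PySem.List.sorted candidates (fun x => x)

-- ===== PORT B =====
-- ref_text.startswith(probe, i), exact for 0 ≤ i (every i drawn from range(...) below is ≥ 0):
-- "probe is a prefix of ref_text[i:]", and False once the start lies past the end of ref_text
def pvStartswithAt (ref_text probe : String) (i : Int) : Bool :=
  if (ref_text.toList.length : Int) < i then false
  else probe.toList.isPrefixOf (ref_text.toList.drop i.toNat)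

def collect_probe_candidates_py_alt (ocr_text : String) (ref_text : String) (probe_len : Int) : List Int :=
  if PySem.Str.len ocr_text < probe_len then []
  else
    let probe_set : PySem.Set String := PySem.Set.ofList (pvProbes ocr_text probe_len)
    let n := PySem.Str.len ref_text
    let candidates := (PySem.List.pyRange 0 (n + 1)).foldl
      (fun cands i =>
        if i + probe_len ≤ n ∧ probe_set.any (fun probe => pvStartswithAt ref_text probe i)
        then PySem.Set.add cands i else cands)
      PySem.Set.empty
    PySem.List.sorted candidates (fun x => x)

-- ===== PRECONDITION & SPEC =====
def Spec_collect_probe_candidates_py (ocr_text : String) (ref_text : String) (probe_len : Int) (out : List Int) : Prop := out = collect_probe_candidates_py_alt ocr_text ref_text probe_len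
instance (ocr_text : String) (ref_text : String) (probe_len : Int) (out : List Int) : Decidable (Spec_collect_probe_candidates_py ocr_text ref_text probe_len out) := by unfold Spec_collect_probe_candidates_py; infer_instance

-- ===== CLAIM (what is proved, stated in full; the proofs are below) =====
def Claim_equal_collect_probe_candidates_py : Prop := ∀ (ocr_text : String) (ref_text : String) (probe_len : Int), Dom_collect_probe_candidates_py ocr_text ref_text probe_len → Spec_collect_probe_candidates_py ocr_text ref_text probe_len (collect_probe_candidates_py ocr_text ref_text probe_len)

-- ===== LEMMAS AND PROOFS =====

-- a find with a start past the end of the string fails (CPython: even for the empty substring)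
theorem pv_findFrom_past (s sub : List Char) (k : Int) (h : (s.length : Int) < k) :
    PySem.Chars.findFrom s sub k none = -1 := by
  simp only [PySem.Chars.findFrom]
  split_ifs <;> omega

-- an occurrence at j ≥ s is an infix of the drop at s
theorem pv_occ_infix {P L : List Char} {s j : Nat} (hs : s ≤ j) (h : P <+: L.drop j) :
    P <:+: L.drop s := by
  have hd : L.drop j = (L.drop s).drop (j - s) := by
    rw [List.drop_drop]; congr 1; omega
  exact ((hd ▸ h).isInfix).trans ((List.drop_suffix _ _).isInfix)

-- membership in A's find-loop: cands plus every occurrence position between start and len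
theorem pv_mem_findLoop (ref_text probe : String) :
    ∀ (fuel : Nat) (start : Nat) (cands : PySem.Set Int) (x : Int),
      ref_text.toList.length + 2 ≤ fuel + start →
      (x ∈ pvFindLoop ref_text probe (start : Int) cands fuel ↔
        x ∈ cands ∨ ∃ j : Nat, start ≤ j ∧ j ≤ ref_text.toList.length ∧
          probe.toList <+: ref_text.toList.drop j ∧ x = (j : Int)) := by
  intro fuel
  induction fuel with
  | zero =>
    intro start cands x hfuel
    simp only [pvFindLoop]
    constructor
    · exact Or.inl
    · rintro (hx | ⟨j, hj, hjlen, _, rfl⟩)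
      · exact hx
      · omega
  | succ fuel ih =>
    intro start cands x hfuel
    simp only [pvFindLoop, PySem.Str.findFrom_eq]
    by_cases hst : start ≤ ref_text.toList.length
    · rw [PySem.Chars.findFrom_natCast _ _ start hst]
      by_cases hfind : PySem.Chars.find (ref_text.toList.drop start) probe.toList = -1
      · rw [if_pos hfind]
        have hno : ¬ probe.toList <:+: ref_text.toList.drop start :=
          (PySem.Chars.find_eq_neg_one_iff _ _).mp hfind
        simp only [if_pos (by norm_num : (-1 : Int) < 0)]
        constructor
        · exact Or.inl
        · rintro (hx | ⟨j, hj, _, hocc, rfl⟩)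
          · exact hx
          · exact absurd (pv_occ_infix hj hocc) hno
      · rw [if_neg hfind]
        have hge : 0 ≤ PySem.Chars.find (ref_text.toList.drop start) probe.toList := by
          have := PySem.Chars.neg_one_le_find (ref_text.toList.drop start) probe.toList
          omega
        have hfle := PySem.Chars.find_le_length (ref_text.toList.drop start) probe.toList
        simp only [List.length_drop] at hfle
        obtain ⟨hocc0, hmin⟩ := PySem.Chars.find_spec hge
        set f : Int := PySem.Chars.find (ref_text.toList.drop start) probe.toList with hf
        -- the hit position
        set j0 : Nat := start + f.toNat with hj0
        have hposv : (start : Int) + f = (j0 : Int) := by omega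
        have hocc : probe.toList <+: ref_text.toList.drop j0 := by
          rw [hj0, ← List.drop_drop]
          exact hocc0
        have hj0le : j0 ≤ ref_text.toList.length := by omega
        rw [if_neg (by omega)]
        rw [hposv]
        have hcast : ((j0 : Int) + 1) = ((j0 + 1 : Nat) : Int) := by push_cast; ring
        rw [hcast, ih (j0 + 1) _ x (by omega)]
        rw [PySem.Set.mem_add]
        constructor
        · rintro ((hx | rfl) | ⟨j, hj, hjlen, hoccj, rfl⟩)
          · exact Or.inl hx
          · exact Or.inr ⟨j0, by omega, hj0le, hocc, rfl⟩
          · exact Or.inr ⟨j, by omega, hjlen, hoccj, rfl⟩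
        · rintro (hx | ⟨j, hj, hjlen, hoccj, rfl⟩)
          · exact Or.inl (Or.inl hx)
          · rcases lt_trichotomy j j0 with hlt | rfl | hgt
            · exfalso
              have h1 : start + (j - start) = j := by omega
              have h2 : ¬ probe.toList <+: (ref_text.toList.drop start).drop (j - start) :=
                hmin (j - start) (by omega)
              rw [List.drop_drop, h1] at h2
              exact h2 hoccj
            · exact Or.inl (Or.inr rfl)
            · exact Or.inr ⟨j, by omega, hjlen, hoccj, rfl⟩
    · -- start is past the end: find fails, and there is no position left
      rw [pv_findFrom_past _ _ _ (by omega)]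
      simp only [if_pos (by norm_num : (-1 : Int) < 0)]
      constructor
      · exact Or.inl
      · rintro (hx | ⟨j, hj, hjlen, _, rfl⟩)
        · exact hx
        · omega

theorem pv_nodup_findLoop (ref_text probe : String) :
    ∀ (fuel : Nat) (start : Int) (cands : PySem.Set Int),
      cands.Nodup → (pvFindLoop ref_text probe start cands fuel).Nodup := by
  intro fuel
  induction fuel with
  | zero => intro start cands h; simpa [pvFindLoop] using h
  | succ fuel ih =>
    intro start cands h
    simp only [pvFindLoop]
    split
    · exact h
    · exact ih _ _ (PySem.Set.nodup_add _ _ h)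

-- membership in A's fold over the probes
theorem pv_mem_foldA (ref_text : String) (prs : List String) :
    ∀ (cands : PySem.Set Int) (x : Int),
      (x ∈ prs.foldl
          (fun cands probe => pvFindLoop ref_text probe 0 cands ((PySem.Str.len ref_text).toNat + 2))
          cands ↔
        x ∈ cands ∨ ∃ pr ∈ prs, ∃ j : Nat, j ≤ ref_text.toList.length ∧
          pr.toList <+: ref_text.toList.drop j ∧ x = (j : Int)) := by
  induction prs with
  | nil => intro cands x; simp
  | cons pr prs ih =>
    intro cands x
    simp only [List.foldl_cons]
    rw [ih]
    have h0 : ((0 : Nat) : Int) = (0 : Int) := rfl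
    rw [← h0, pv_mem_findLoop ref_text pr _ 0 cands x (by rw [PySem.Str.len_eq]; omega)]
    simp only [List.mem_cons]
    constructor
    · rintro ((hx | ⟨j, _, hjlen, hocc, rfl⟩) | ⟨q, hq, j, hjlen, hocc, rfl⟩)
      · exact Or.inl hx
      · exact Or.inr ⟨pr, Or.inl rfl, j, hjlen, hocc, rfl⟩
      · exact Or.inr ⟨q, Or.inr hq, j, hjlen, hocc, rfl⟩
    · rintro (hx | ⟨q, hq | hq, j, hjlen, hocc, rfl⟩)
      · exact Or.inl (Or.inl hx)
      · exact Or.inl (Or.inr ⟨j, Nat.zero_le _, hjlen, by rw [← hq]; exact hocc, rfl⟩)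
      · exact Or.inr ⟨q, hq, j, hjlen, hocc, rfl⟩

theorem pv_nodup_foldA (ref_text : String) (prs : List String) :
    ∀ (cands : PySem.Set Int), cands.Nodup →
      (prs.foldl
        (fun cands probe => pvFindLoop ref_text probe 0 cands ((PySem.Str.len ref_text).toNat + 2))
        cands).Nodup := by
  induction prs with
  | nil => intro cands h; simpa using h
  | cons pr prs ih =>
    intro cands h
    exact ih _ (pv_nodup_findLoop _ _ _ _ _ h)

-- membership in B's conditional-add fold
theorem pv_mem_foldB (c : Int → Prop) [DecidablePred c] :
    ∀ (is : List Int) (cands : PySem.Set Int) (x : Int),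
      (x ∈ is.foldl (fun s i => if c i then PySem.Set.add s i else s) cands ↔
        x ∈ cands ∨ (x ∈ is ∧ c x)) := by
  intro is
  induction is with
  | nil => intro cands x; simp
  | cons i is ih =>
    intro cands x
    simp only [List.foldl_cons, List.mem_cons]
    by_cases hi : c i
    · rw [if_pos hi, ih]
      rw [PySem.Set.mem_add]
      constructor
      · rintro ((hx | rfl) | ⟨hx, hc⟩)
        · exact Or.inl hx
        · exact Or.inr ⟨Or.inl rfl, hi⟩
        · exact Or.inr ⟨Or.inr hx, hc⟩
      · rintro (hx | ⟨rfl | hx, hc⟩)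
        · exact Or.inl (Or.inl hx)
        · exact Or.inl (Or.inr rfl)
        · exact Or.inr ⟨hx, hc⟩
    · rw [if_neg hi, ih]
      constructor
      · rintro (hx | ⟨hx, hc⟩)
        · exact Or.inl hx
        · exact Or.inr ⟨Or.inr hx, hc⟩
      · rintro (hx | ⟨rfl | hx, hc⟩)
        · exact Or.inl hx
        · exact absurd hc hi
        · exact Or.inr ⟨hx, hc⟩

theorem pv_nodup_foldB (c : Int → Prop) [DecidablePred c] :
    ∀ (is : List Int) (cands : PySem.Set Int), cands.Nodup →
      (is.foldl (fun s i => if c i then PySem.Set.add s i else s) cands).Nodup := by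
  intro is
  induction is with
  | nil => intro cands h; simpa using h
  | cons i is ih =>
    intro cands h
    simp only [List.foldl_cons]
    split
    · exact ih _ (PySem.Set.nodup_add _ _ h)
    · exact ih _ h

-- every probe has length exactly probe_len (for 1 ≤ probe_len ≤ len(ocr_text))
theorem pv_probes_len (ocr_text : String) (probe_len : Int) (hp : 1 ≤ probe_len)
    (hlen : probe_len ≤ PySem.Str.len ocr_text) :
    ∀ pr ∈ pvProbes ocr_text probe_len, pr.toList.length = probe_len.toNat := by
  intro pr hpr
  rw [PySem.Str.len_eq] at hlen
  set L := ocr_text.toList with hL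
  set p := probe_len.toNat with hpn
  have hple : p ≤ L.length := by omega
  simp only [pvProbes, PySem.Str.len_eq, ← hL] at hpr
  have h1 : (PySem.Str.slice ocr_text none (some probe_len)).toList.length = p := by
    simp only [PySem.Str.slice, String.toList_ofList, PySem.Chars.slice]
    rw [PySem.List.slice_to _ (by omega)]
    simp [← hL]; omega
  have h2 : probe_len * 2 ≤ (L.length : Int) →
      (PySem.Str.slice ocr_text (some (PySem.Int.floordiv (PySem.Str.len ocr_text) 2))
        (some (PySem.Int.floordiv (PySem.Str.len ocr_text) 2 + probe_len))).toList.length = p := by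
    intro h2p
    have hmid : PySem.Int.floordiv (PySem.Str.len ocr_text) 2 = ((L.length / 2 : Nat) : Int) := by
      simp only [PySem.Int.floordiv, PySem.Str.len_eq, ← hL]
      rw [Int.fdiv_eq_ediv]
      simp
    simp only [PySem.Str.slice, String.toList_ofList, PySem.Chars.slice, hmid]
    rw [PySem.List.slice_toNat _ (by positivity) (by omega)]
    simp [← hL]
    omega
  have h3 : probe_len * 3 ≤ (L.length : Int) →
      (PySem.Str.slice ocr_text (some (-probe_len)) none).toList.length = p := by
    intro h3p
    have hneg : -probe_len = -((p : Nat) : Int) := by omega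
    simp only [PySem.Str.slice, String.toList_ofList, PySem.Chars.slice, hneg]
    rw [PySem.List.slice_from_neg_natCast _ p (by omega)]
    simp [← hL]
    omega
  split_ifs at hpr with hc3 hc2 hc2'
  · simp only [List.mem_append, List.mem_singleton] at hpr
    rcases hpr with (rfl | rfl) | rfl
    · exact h1
    · exact h2 hc2
    · exact h3 hc3
  · simp only [List.mem_append, List.mem_singleton] at hpr
    rcases hpr with rfl | rfl
    · exact h1
    · exact h3 hc3
  · simp only [List.mem_append, List.mem_singleton] at hpr
    rcases hpr with rfl | rfl
    · exact h1
    · exact h2 hc2'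
  · simp only [List.mem_singleton] at hpr
    subst hpr
    exact h1

-- ===== VERDICT (by name: the statement is the Claim_ definition above) =====
theorem collect_probe_candidates_py_spec : Claim_equal_collect_probe_candidates_py := by
  intro ocr_text ref_text probe_len _hdom
  unfold Spec_collect_probe_candidates_py
  by_cases hlt : PySem.Str.len ocr_text < probe_len
  · simp only [collect_probe_candidates_py, collect_probe_candidates_py_alt, if_pos hlt]
  · simp only [collect_probe_candidates_py, collect_probe_candidates_py_alt, if_neg hlt]
    have hlen : probe_len ≤ PySem.Str.len ocr_text := by omega
    have hempty : (PySem.Set.empty : PySem.Set Int).Nodup := by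
      simp [PySem.Set.empty]
    apply PySem.List.sorted_eq_sorted_of_perm _ _ _ (fun a b hab => hab)
    rw [List.perm_ext_iff_of_nodup
      (pv_nodup_foldA ref_text (pvProbes ocr_text probe_len) _ hempty)
      (pv_nodup_foldB _ _ _ hempty)]
    intro x
    rw [pv_mem_foldA ref_text (pvProbes ocr_text probe_len) PySem.Set.empty x]
    rw [pv_mem_foldB
      (fun i => i + probe_len ≤ PySem.Str.len ref_text ∧
        ((PySem.Set.ofList (pvProbes ocr_text probe_len)).any
          (fun probe => pvStartswithAt ref_text probe i) = true))
      (PySem.List.pyRange 0 (PySem.Str.len ref_text + 1)) PySem.Set.empty x]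
    have hnil : x ∈ (PySem.Set.empty : PySem.Set Int) ↔ False := by
      simp [PySem.Set.empty]
    rw [hnil]
    simp only [false_or]
    constructor
    · rintro ⟨pr, hpr, j, hjlen, hocc, rfl⟩
      have hfit : (j : Int) + probe_len ≤ PySem.Str.len ref_text := by
        by_cases hp1 : 1 ≤ probe_len
        · have hL := hocc.length_le
          simp only [List.length_drop] at hL
          rw [pv_probes_len ocr_text probe_len hp1 hlen pr hpr] at hL
          rw [PySem.Str.len_eq]
          omega
        · rw [PySem.Str.len_eq]
          omega
      refine ⟨PySem.List.mem_pyRange_one.mpr ⟨by positivity,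
        by rw [PySem.Str.len_eq]; omega⟩, hfit, ?_⟩
      simp only [List.any_eq_true]
      refine ⟨pr, (PySem.Set.mem_ofList _ _).mpr hpr, ?_⟩
      simp only [pvStartswithAt, Int.toNat_natCast]
      rw [if_neg (by omega)]
      exact List.isPrefixOf_iff_prefix.mpr hocc
    · rintro ⟨hx, _hfit, hc⟩
      obtain ⟨hx0, hxlt⟩ := PySem.List.mem_pyRange_one.mp hx
      obtain ⟨j, rfl⟩ : ∃ j : Nat, x = (j : Int) := ⟨x.toNat, by omega⟩
      simp only [List.any_eq_true] at hc
      obtain ⟨pr, hpr, hsw⟩ := hc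
      simp only [pvStartswithAt, Int.toNat_natCast] at hsw
      by_cases hjl : (ref_text.toList.length : Int) < (j : Int)
      · rw [if_pos hjl] at hsw
        exact absurd hsw (by simp)
      · rw [if_neg hjl] at hsw
        rw [PySem.Str.len_eq] at hxlt
        exact ⟨pr, (PySem.Set.mem_ofList _ _).mp hpr, j, by omega,
          List.isPrefixOf_iff_prefix.mp hsw, rfl⟩
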